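-- pv_equiv track=rewrite | github.com/Pankhil07/AMPFormer | test_gumbeldore_marcelo_1.py | has_repeated_tripeptide
-- ===== SOURCE A (Python) =====
-- from collections import defaultdict
--
-- def has_repeated_tripeptide(sequence: str) -> bool:
--     tripeptide_counts = defaultdict(int)
--     seq_length = len(sequence)
--     for i in range(seq_length - 2):
--         tripeptide = sequence[i:i+3]
--         tripeptide_counts[tripeptide] += 1
--         if tripeptide_counts[tripeptide] > 3:
--             return True
--     return False
-- ===== SOURCE B (Python) =====
-- def has_repeated_tripeptide(sequence: str) -> bool:
--     tris = sorted(sequence[i:i+3] for i in range(len(sequence) - 2))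
--     return any(tris[j] == tris[j + 3] for j in range(len(tris) - 3))
-- ===== Notes on version B (the rewrite author's own statement) =====
-- stated objective: alternative
-- what changed: B sorts the list of all tripeptides and scans the sorted list for a run of four equal consecutive entries (tris[j] == tris[j+3]), instead of A's dict-counting loop with an early return on count > 3.
import Mathlib
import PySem

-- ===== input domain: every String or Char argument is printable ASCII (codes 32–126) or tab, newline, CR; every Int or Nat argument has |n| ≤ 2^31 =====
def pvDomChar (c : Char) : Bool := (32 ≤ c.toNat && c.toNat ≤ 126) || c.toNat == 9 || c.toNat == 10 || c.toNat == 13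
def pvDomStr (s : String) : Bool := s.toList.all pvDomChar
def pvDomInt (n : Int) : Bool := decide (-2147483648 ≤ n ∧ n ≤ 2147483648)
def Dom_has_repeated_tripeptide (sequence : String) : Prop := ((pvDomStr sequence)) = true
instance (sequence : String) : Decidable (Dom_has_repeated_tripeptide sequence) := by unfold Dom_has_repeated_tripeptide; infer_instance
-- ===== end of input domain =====

-- B replaces A's dict-counting early-return loop by sort-then-scan: sort the tripeptide list and
-- look for four equal consecutive entries (alternative algorithm, same result).

-- ===== PORT A =====
-- A's for-loop with its early return: structural recursion over the index list, carrying the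
-- defaultdict; `modify t 0 (·+1)` is `tripeptide_counts[tripeptide] += 1` on a defaultdict(int).
def pvALoop (counts : PySem.Dict (List Char) Int) (cs : List Char) : List Int → Bool
  | [] => false
  | i :: rest =>
    let tripeptide := PySem.List.slice cs (some i) (some (i + 3))
    let counts' := counts.modify tripeptide 0 (· + 1)
    if counts'.getD tripeptide 0 > 3 then true else pvALoop counts' cs rest

def has_repeated_tripeptide (sequence : String) : Bool :=
  let seq_length : Int := PySem.Str.len sequence
  pvALoop PySem.Dict.empty sequence.toList (PySem.List.pyRange 0 (seq_length - 2) 1)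

-- ===== PORT B =====
def has_repeated_tripeptide_alt (sequence : String) : Bool :=
  let cs := sequence.toList
  let tris := PySem.List.sorted
      ((PySem.List.pyRange 0 (PySem.Str.len sequence - 2) 1).map
        (fun i => PySem.List.slice cs (some i) (some (i + 3)))) (fun t => t)
  (PySem.List.pyRange 0 ((tris.length : Int) - 3) 1).any
    (fun j => PySem.List.pyGet? tris j == PySem.List.pyGet? tris (j + 3))

-- ===== PRECONDITION & SPEC =====
def Spec_has_repeated_tripeptide (sequence : String) (out : Bool) : Prop := out = has_repeated_tripeptide_alt sequence
instance (sequence : String) (out : Bool) : Decidable (Spec_has_repeated_tripeptide sequence out) := by unfold Spec_has_repeated_tripeptide; infer_instance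

-- ===== CLAIM (what is proved, stated in full; the proofs are below) =====
def Claim_equal_has_repeated_tripeptide : Prop := ∀ (sequence : String), Dom_has_repeated_tripeptide sequence → Spec_has_repeated_tripeptide sequence (has_repeated_tripeptide sequence)

-- ===== LEMMAS AND PROOFS =====

-- A's loop over indices is a loop over the list of tripeptides.
def pvAGo (counts : PySem.Dict (List Char) Int) : List (List Char) → Bool
  | [] => false
  | t :: rest =>
    let counts' := counts.modify t 0 (· + 1)
    if counts'.getD t 0 > 3 then true else pvAGo counts' rest

lemma pvALoop_eq_pvAGo (cs : List Char) (d : PySem.Dict (List Char) Int) (is : List Int) :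
    pvALoop d cs is = pvAGo d (is.map (fun i => PySem.List.slice cs (some i) (some (i + 3)))) := by
  induction is generalizing d with
  | nil => rfl
  | cons i rest ih => simp [pvALoop, pvAGo, ih]

-- Characterisation of A's early-exit loop: it fires iff some element's final count crosses 3
-- (counts only grow, so crossing at some step ↔ the total crosses).
lemma pvAGo_iff (ts : List (List Char)) (d : PySem.Dict (List Char) Int) :
    pvAGo d ts = true ↔ ∃ t ∈ ts, d.getD t 0 + (ts.count t : Int) > 3 := by
  induction ts generalizing d with
  | nil => simp [pvAGo]
  | cons t rest ih =>
    simp only [pvAGo]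
    rw [show (d.modify t 0 (· + 1)).getD t 0 = d.getD t 0 + 1 from
      PySem.Dict.getD_modify_self d t 0 (· + 1)]
    by_cases h : d.getD t 0 + 1 > 3
    · simp only [if_pos h]
      constructor
      · intro _
        refine ⟨t, by simp, ?_⟩
        simp
        omega
      · intro _; trivial
    · simp only [if_neg h, ih]
      constructor
      · rintro ⟨u, hu, hgt⟩
        rw [PySem.Dict.getD_modify] at hgt
        refine ⟨u, by simp [hu], ?_⟩
        by_cases hut : u = t
        · subst hut; simp at hgt; simp; omega
        · simp [hut] at hgt; simp [List.count_cons]; omega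
      · rintro ⟨u, hu, hgt⟩
        by_cases hut : u = t
        · subst hut
          simp at hgt
          have hmem : u ∈ rest := by
            by_contra hn
            rw [List.count_eq_zero_of_not_mem hn] at hgt
            omega
          refine ⟨u, hmem, ?_⟩
          rw [PySem.Dict.getD_modify]
          simp
          omega
        · have hu' : u ∈ rest := by simpa [hut] using hu
          refine ⟨u, hu', ?_⟩
          rw [PySem.Dict.getD_modify, if_neg hut]
          simp [Ne.symm hut] at hgt
          omega

-- In a monotone list, a pair of equal entries three apart exists iff some value occurs > 3 times.
lemma run_of_count (l : List (List Char)) (t : List Char)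
    (mono : ∀ p q : ℕ, (hpq : p ≤ q) → (hq : q < l.length) →
      l[p]'(Nat.lt_of_le_of_lt hpq hq) ≤ l[q])
    (h4 : 4 ≤ l.count t) :
    ∃ j : ℕ, ∃ h : j + 3 < l.length,
      l[j]'(Nat.lt_of_le_of_lt (Nat.le_add_right j 3) h) = l[j + 3]'h := by
  have hmem : t ∈ l := List.count_pos_iff.mp (by omega)
  set i0 := l.idxOf t with hi0def
  have hi0 : i0 < l.length := List.idxOf_lt_length_of_mem hmem
  have ht0 : l[i0] = t := List.getElem_idxOf hi0
  -- no t before i0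
  have htake : l.count t = (l.drop i0).count t := by
    have hnt : t ∉ l.take i0 := by
      rw [List.mem_take_iff_idxOf_lt hmem]; omega
    conv_lhs => rw [← List.take_append_drop i0 l]
    rw [List.count_append, List.count_eq_zero_of_not_mem hnt]
    omega
  have hlen : 4 ≤ (l.drop i0).length := le_trans (htake ▸ h4) (List.count_le_length)
  rw [List.length_drop] at hlen
  have hj3 : i0 + 3 < l.length := by omega
  refine ⟨i0, hj3, ?_⟩
  by_contra hne
  have hle : l[i0] ≤ l[i0 + 3] := mono i0 (i0 + 3) (by omega) hj3
  have hlt : t < l[i0 + 3] := lt_of_le_of_ne (ht0 ▸ hle) (fun he => hne (ht0.trans he))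
  -- every element from position i0+3 on exceeds t
  have hnd : t ∉ l.drop (i0 + 3) := by
    intro hm
    obtain ⟨q, hq, hqe⟩ := List.mem_iff_getElem.mp hm
    have hq' : i0 + 3 + q < l.length := by
      have := hq; rw [List.length_drop] at this; omega
    have : l[i0 + 3] ≤ l[i0 + 3 + q] := mono (i0 + 3) (i0 + 3 + q) (by omega) hq'
    rw [List.getElem_drop] at hqe
    exact absurd (hqe ▸ this) (not_le.mpr hlt)
  have hsplit : (l.drop i0).count t
      = ((l.drop i0).take 3).count t + (l.drop (i0 + 3)).count t := by
    conv_lhs => rw [← List.take_append_drop 3 (l.drop i0)]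
    rw [List.count_append, List.drop_drop]
  have h1 : ((l.drop i0).take 3).count t ≤ 3 :=
    le_trans List.count_le_length (by simp)
  rw [List.count_eq_zero_of_not_mem hnd] at hsplit
  omega

lemma count_of_run (l : List (List Char)) (j : ℕ)
    (mono : ∀ p q : ℕ, (hpq : p ≤ q) → (hq : q < l.length) →
      l[p]'(Nat.lt_of_le_of_lt hpq hq) ≤ l[q])
    (hj : j + 3 < l.length)
    (he : l[j]'(Nat.lt_of_le_of_lt (Nat.le_add_right j 3) hj) = l[j + 3]) :
    4 ≤ l.count (l[j]'(Nat.lt_of_le_of_lt (Nat.le_add_right j 3) hj)) := by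
  set t := l[j]'(Nat.lt_of_le_of_lt (Nat.le_add_right j 3) hj) with htdef
  have hall : ∀ i : ℕ, (hi : i ≤ 3) → l[j + i]'(by omega) = t := by
    intro i hi
    have h1 : t ≤ l[j + i]'(by omega) := mono j (j + i) (by omega) (by omega)
    have h2 : l[j + i]'(by omega) ≤ l[j + 3] := mono (j + i) (j + 3) (by omega) hj
    exact le_antisymm (he ▸ h2) h1
  have hrep : (l.drop j).take 4 = List.replicate 4 t := by
    apply List.ext_getElem
    · rw [List.length_take, List.length_drop, List.length_replicate]; omega
    · intro i h1 h2
      rw [List.getElem_take, List.getElem_drop, List.getElem_replicate]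
      exact hall i (by rw [List.length_replicate] at h2; omega)
  have : l.count t = (l.take j).count t + (((l.drop j).take 4).count t + ((l.drop j).drop 4).count t) := by
    conv_lhs => rw [← List.take_append_drop j l]
    conv_lhs => rw [← List.take_append_drop 4 (l.drop j)]
    rw [List.count_append, List.count_append]
  rw [hrep, List.count_replicate_self] at this
  omega

-- B's sorted-scan fires iff some tripeptide occurs more than 3 times.
lemma pvB_iff (ts : List (List Char)) :
    ((PySem.List.pyRange 0 (((PySem.List.sorted ts (fun t => t)).length : Int) - 3) 1).any
      (fun j => PySem.List.pyGet? (PySem.List.sorted ts (fun t => t)) j ==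
                PySem.List.pyGet? (PySem.List.sorted ts (fun t => t)) (j + 3))) = true ↔
    ∃ t ∈ ts, (ts.count t : Int) > 3 := by
  -- the port's sorted uses List.instLT; align it with the LinearOrder instances of the order lemmas
  have hS : (PySem.List.sorted ts (fun t : List Char => t)) =
      (@PySem.List.sorted (List Char) (List Char)
        (@LinearOrder.toPartialOrder _ inferInstance).toPreorder.toLT
        (@LinearOrder.toDecidableLT _ inferInstance) ts (fun t => t) false) := by congr 1
  rw [hS]
  have hperm : (@PySem.List.sorted (List Char) (List Char)
      (@LinearOrder.toPartialOrder _ inferInstance).toPreorder.toLT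
      (@LinearOrder.toDecidableLT _ inferInstance) ts (fun t => t) false).Perm ts :=
    @PySem.List.sorted_perm (List Char) (List Char)
      (@LinearOrder.toPartialOrder _ inferInstance).toPreorder.toLT
      (@LinearOrder.toDecidableLT _ inferInstance) ts (fun t => t) false
  have mono : ∀ p q : ℕ, (hpq : p ≤ q) →
      (hq : q < (@PySem.List.sorted (List Char) (List Char)
        (@LinearOrder.toPartialOrder _ inferInstance).toPreorder.toLT
        (@LinearOrder.toDecidableLT _ inferInstance) ts (fun t => t) false).length) →
      (@PySem.List.sorted (List Char) (List Char)
        (@LinearOrder.toPartialOrder _ inferInstance).toPreorder.toLT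
        (@LinearOrder.toDecidableLT _ inferInstance) ts (fun t => t) false)[p]'(Nat.lt_of_le_of_lt hpq hq) ≤
      (@PySem.List.sorted (List Char) (List Char)
        (@LinearOrder.toPartialOrder _ inferInstance).toPreorder.toLT
        (@LinearOrder.toDecidableLT _ inferInstance) ts (fun t => t) false)[q] :=
    fun p q hpq hq => PySem.List.key_sorted_getElem_mono ts (fun t => t) hpq hq
  set l := @PySem.List.sorted (List Char) (List Char)
      (@LinearOrder.toPartialOrder _ inferInstance).toPreorder.toLT
      (@LinearOrder.toDecidableLT _ inferInstance) ts (fun t => t) false with hl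
  rw [List.any_eq_true]
  constructor
  · rintro ⟨j, hjmem, hbeq⟩
    obtain ⟨hj0, hjlt⟩ := PySem.List.mem_pyRange_one.mp hjmem
    have hj3 : j.toNat + 3 < l.length := by omega
    rw [PySem.List.pyGet?_of_nonneg _ hj0, PySem.List.pyGet?_of_nonneg _ (by omega : (0:Int) ≤ j + 3)] at hbeq
    have h3 : (j + 3).toNat = j.toNat + 3 := by omega
    rw [h3, List.getElem?_eq_getElem (by omega), List.getElem?_eq_getElem hj3] at hbeq
    have he : l[j.toNat]'(Nat.lt_of_le_of_lt (Nat.le_add_right _ 3) hj3) = l[j.toNat + 3] := by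
      simpa using hbeq
    have hc := count_of_run l j.toNat mono hj3 he
    refine ⟨l[j.toNat]'(by omega), hperm.mem_iff.mp (l.getElem_mem _), ?_⟩
    rw [← hperm.count_eq]
    omega
  · rintro ⟨t, htm, hc⟩
    have h4 : 4 ≤ l.count t := by rw [hperm.count_eq]; omega
    obtain ⟨j, hj3, he⟩ := run_of_count l t mono h4
    refine ⟨(j : Int), PySem.List.mem_pyRange_one.mpr ⟨by omega, by omega⟩, ?_⟩
    rw [PySem.List.pyGet?_of_nonneg _ (by omega : (0:Int) ≤ (j:Int)),
        PySem.List.pyGet?_of_nonneg _ (by omega : (0:Int) ≤ (j:Int) + 3)]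
    have h3 : ((j : Int) + 3).toNat = j + 3 := by omega
    have hjn : ((j : Int)).toNat = j := by omega
    rw [h3, hjn, List.getElem?_eq_getElem (by omega), List.getElem?_eq_getElem hj3]
    simpa using he

-- ===== VERDICT (by name: the statement is the Claim_ definition above) =====
theorem has_repeated_tripeptide_spec : Claim_equal_has_repeated_tripeptide := by
  intro sequence _
  unfold Spec_has_repeated_tripeptide has_repeated_tripeptide has_repeated_tripeptide_alt
  rw [pvALoop_eq_pvAGo]
  rw [Bool.eq_iff_iff, pvAGo_iff, pvB_iff]
  simp [PySem.Dict.getD_empty]
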